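-- pv_equiv track=rewrite | github.com/kr4g/Klotho | klotho/topos/topos.py | permut_list
-- ===== SOURCE A (Python) =====
-- def permut_list(lst:tuple, pt:int, preserve_signs:bool=False) -> tuple:
--     '''
--     Algorithm 4: PermutList with optional sign preservation
--
--     :param lst: List of elements to be permuted.
--     :param pt: Starting position for the permutation.
--     :param preserve_signs: If True, preserves signs while rotating absolute values.
--     :return: Circularly permuted list.
--     '''
--     if not preserve_signs:
--         pt = pt % len(lst)
--         return lst[pt:] + lst[:pt]
--
--     signs = tuple(1 if x >= 0 else -1 for x in lst)
--     abs_values = tuple(abs(x) for x in lst)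
--
--     pt = pt % len(abs_values)
--     rotated = abs_values[pt:] + abs_values[:pt]
--
--     return tuple(val * sign for val, sign in zip(rotated, signs))
-- ===== SOURCE B (Python) =====
-- def permut_list(lst: tuple, pt: int, preserve_signs: bool = False) -> tuple:
--     n = len(lst)
--     pt = pt % n  # ZeroDivisionError on empty input, as in the original
--     out = []
--     for i in range(n):
--         v = lst[(i + pt) % n]
--         if preserve_signs:
--             v = abs(v) if lst[i] >= 0 else -abs(v)
--         out.append(v)
--     return tuple(out)
-- ===== Notes on version B (the rewrite author's own statement) =====
-- stated objective: simpler
-- what changed: Replaces A's four tuple passes (signs tuple, abs tuple, two slice concatenations, zip-map) with a single index-driven loop that reads each output element by modular indexing and pins the sign to its position.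
import Mathlib
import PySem

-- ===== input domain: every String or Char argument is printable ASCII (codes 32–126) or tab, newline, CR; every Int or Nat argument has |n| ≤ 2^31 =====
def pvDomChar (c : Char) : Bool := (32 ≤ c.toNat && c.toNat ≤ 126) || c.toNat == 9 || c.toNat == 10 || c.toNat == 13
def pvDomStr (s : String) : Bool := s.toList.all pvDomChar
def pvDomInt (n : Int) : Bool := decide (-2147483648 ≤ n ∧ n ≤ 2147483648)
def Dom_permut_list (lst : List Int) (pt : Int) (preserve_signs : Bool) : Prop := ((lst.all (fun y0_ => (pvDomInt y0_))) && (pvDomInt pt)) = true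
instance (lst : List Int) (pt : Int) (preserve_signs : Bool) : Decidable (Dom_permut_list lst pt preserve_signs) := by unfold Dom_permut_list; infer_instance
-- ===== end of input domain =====

-- B replaces A's four tuple passes with one index-driven loop using modular indexing (objective: simpler).


-- ===== PORT A =====
def permut_list (lst : List Int) (pt : Int) (preserve_signs : Bool) : List Int :=
  if !preserve_signs then
    let pt' := PySem.Int.mod pt lst.length
    PySem.List.slice lst (some pt') none ++ PySem.List.slice lst none (some pt')
  else
    let signs := lst.map (fun x => if x ≥ 0 then (1 : Int) else -1)
    let abs_values := lst.map (fun x => |x|)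
    let pt' := PySem.Int.mod pt abs_values.length
    let rotated := PySem.List.slice abs_values (some pt') none ++ PySem.List.slice abs_values none (some pt')
    (rotated.zip signs).map (fun p => p.1 * p.2)

-- ===== PORT B =====
def permut_list_alt (lst : List Int) (pt : Int) (preserve_signs : Bool) : List Int :=
  let n : Int := lst.length
  let pt' := PySem.Int.mod pt n
  (PySem.List.pyRange 0 n 1).foldl
    (fun out i =>
      let v := PySem.List.pyGetD lst (PySem.Int.mod (i + pt') n) 0
      let v := if preserve_signs then (if PySem.List.pyGetD lst i 0 ≥ 0 then |v| else -|v|) else v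
      out ++ [v]) []

-- ===== PRECONDITION & SPEC =====
-- Pre_ excludes exactly the empty list, on which the Python A raises ZeroDivisionError (pt % 0).
def Pre_permut_list (lst : List Int) (pt : Int) (preserve_signs : Bool) : Prop := lst ≠ []
instance (lst : List Int) (pt : Int) (preserve_signs : Bool) : Decidable (Pre_permut_list lst pt preserve_signs) := by unfold Pre_permut_list; infer_instance
def pvWitness_permut_list : List Int × Int × Bool := ([3, -1, 4], 2, true)
def Spec_permut_list (lst : List Int) (pt : Int) (preserve_signs : Bool) (out : List Int) : Prop := out = permut_list_alt lst pt preserve_signs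
instance (lst : List Int) (pt : Int) (preserve_signs : Bool) (out : List Int) : Decidable (Spec_permut_list lst pt preserve_signs out) := by unfold Spec_permut_list; infer_instance

-- ===== CLAIM (what is proved, stated in full; the proofs are below) =====
def Claim_equal_permut_list : Prop := ∀ (lst : List Int) (pt : Int) (preserve_signs : Bool), Dom_permut_list lst pt preserve_signs → Pre_permut_list lst pt preserve_signs → Spec_permut_list lst pt preserve_signs (permut_list lst pt preserve_signs)

-- ===== LEMMAS AND PROOFS =====

-- B's fold is a map over range n
theorem alt_eq_map (lst : List Int) (pt : Int) (ps : Bool) (h : lst ≠ []) :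
    permut_list_alt lst pt ps =
      (List.range lst.length).map (fun k =>
        let v := lst.getD ((k + (PySem.Int.mod pt lst.length).toNat) % lst.length) 0
        if ps then (if lst.getD k 0 ≥ 0 then |v| else -|v|) else v) := by
  simp only [permut_list_alt, PySem.List.pyRange_zero_natCast, List.foldl_map,
    PySem.List.foldl_append_singleton_eq_map]
  apply List.map_congr_left
  intro k _
  have hmod : PySem.Int.mod ((k:Int) + PySem.Int.mod pt lst.length) lst.length
      = (((k + (PySem.Int.mod pt lst.length).toNat) % lst.length : Nat) : Int) := by
    have hn : (0:Int) < lst.length := by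
      have := List.length_pos_of_ne_nil h; exact_mod_cast this
    rw [PySem.Int.mod_eq_emod_of_pos hn, PySem.Int.mod_eq_emod_of_pos hn]
    have h0 : (0:Int) ≤ pt % (lst.length:Int) := Int.emod_nonneg _ (by omega)
    push_cast [Int.toNat_of_nonneg h0]
    rfl
  rw [hmod]
  simp only [PySem.List.pyGetD_natCast]
-- rotation as modular indexing
theorem rot_eq (l : List Int) (p : Nat) (hp : p < l.length) :
    l.drop p ++ l.take p = (List.range l.length).map (fun k => l.getD ((k + p) % l.length) 0) := by
  apply List.ext_getElem
  · simp; omega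
  · intro i h1 h2
    have hi : i < l.length := by simpa using h2
    have hlen : (l.drop p).length = l.length - p := by simp
    rw [List.getElem_map, List.getElem_range]
    by_cases hc : i < l.length - p
    · rw [List.getElem_append_left (by omega)]
      have : (i + p) % l.length = p + i := by
        rw [Nat.mod_eq_of_lt (by omega)]; omega
      rw [this, List.getElem_drop, List.getD_eq_getElem _ _ (by omega)]
    · rw [List.getElem_append_right (by omega)]
      have : (i + p) % l.length = i - (l.length - p) := by
        have h3 : i + p = (i - (l.length - p)) + l.length := by omega
        rw [h3, Nat.add_mod_right, Nat.mod_eq_of_lt (by omega)]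
      rw [this, List.getD_eq_getElem _ _ (by omega), List.getElem_take]
      congr 1
      simp [hlen]

theorem zip_mul_eq (n : Nat) (f : Nat → Int) (ys : List Int) (h : n = ys.length) :
    (((List.range n).map f).zip ys).map (fun q => q.1 * q.2)
      = (List.range n).map (fun k => f k * ys.getD k 0) := by
  apply List.ext_getElem
  · simp [h]
  · intro i h1 h2
    have hi : i < n := by simpa using h2
    simp only [List.getElem_map, List.getElem_zip, List.getElem_range,
      List.getD_eq_getElem _ _ (show i < ys.length by omega)]

-- ===== VERDICT =====
theorem permut_list_spec : Claim_equal_permut_list := by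
  intro lst pt ps _ hpre
  have hn : (0:Int) < lst.length := by
    have := List.length_pos_of_ne_nil hpre; exact_mod_cast this
  have hmn : (0:Int) ≤ PySem.Int.mod pt lst.length := PySem.Int.mod_nonneg _ hn
  have hml : PySem.Int.mod pt lst.length < lst.length := PySem.Int.mod_lt _ hn
  have hp : (PySem.Int.mod pt lst.length).toNat < lst.length := by omega
  unfold Spec_permut_list
  rw [alt_eq_map lst pt ps hpre]
  cases ps with
  | false =>
    simp only [permut_list, Bool.not_false]
    rw [PySem.List.slice_from _ hmn, PySem.List.slice_to _ hmn]
    rw [rot_eq lst _ hp]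
    simp
  | true =>
    simp only [permut_list, Bool.not_true, Bool.false_eq_true, if_false]
    have hlen : (lst.map (fun x => |x|)).length = lst.length := by simp
    rw [hlen, PySem.List.slice_from _ hmn, PySem.List.slice_to _ hmn]
    have hp' : (PySem.Int.mod pt lst.length).toNat < (lst.map (fun x => |x|)).length := by
      rw [hlen]; exact hp
    rw [rot_eq (lst.map (fun x => |x|)) _ hp', hlen]
    rw [zip_mul_eq _ _ _ (by simp)]
    apply List.map_congr_left
    intro k hk
    have hk' : k < lst.length := List.mem_range.mp hk
    have hidx : (k + (PySem.Int.mod pt lst.length).toNat) % lst.length < lst.length :=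
      Nat.mod_lt _ (by omega)
    have h1 : (lst.map (fun x => |x|)).getD ((k + (PySem.Int.mod pt lst.length).toNat) % lst.length) 0
        = |lst.getD ((k + (PySem.Int.mod pt lst.length).toNat) % lst.length) 0| := by
      rw [List.getD_eq_getElem _ _ (by simpa using hidx), List.getD_eq_getElem _ _ hidx,
        List.getElem_map]
    have h2 : (lst.map (fun x => if x ≥ 0 then (1:Int) else -1)).getD k 0
        = (if lst.getD k 0 ≥ 0 then (1:Int) else -1) := by
      rw [List.getD_eq_getElem _ _ (by simpa using hk'), List.getD_eq_getElem _ _ hk',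
        List.getElem_map]
    rw [h1, h2]
    by_cases hs : lst.getD k 0 ≥ 0
    · simp [hs]
    · simp [hs]
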